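-- pv_equiv track=rewrite | github.com/Abdulrazak-code/trading-bot | news.py | match_headlines_to_symbols
-- ===== SOURCE A (Python) =====
-- def match_headlines_to_symbols(
--     raw_entries: list, symbols: list
-- ) -> dict:
--     """Match headline text to stock symbols by substring search."""
--     result = {s: [] for s in symbols}
--     for _h, title in raw_entries:
--         for sym in symbols:
--             if sym.upper() in title.upper() and len(result[sym]) < 2:
--                 result[sym].append(title)
--     return result
-- ===== SOURCE B (Python) =====
-- def match_headlines_to_symbols(
--     raw_entries: list, symbols: list
-- ) -> dict:
--     """Match headline text to stock symbols by substring search.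
--
--     Symbol-outer re-implementation: uppercase each title once, then for each
--     symbol scan the pre-uppercased titles and stop as soon as two matches
--     are collected."""
--     pairs = [(t, t.upper()) for _h, t in raw_entries]
--     result = {}
--     for s in symbols:
--         su = s.upper()
--         matches = []
--         for t, tu in pairs:
--             if su in tu:
--                 matches.append(t)
--                 if len(matches) == 2:
--                     break
--         result[s] = matches
--     return result
-- ===== Notes on version B (the rewrite author's own statement) =====
-- stated objective: alternative
-- what changed: Entry-outer double loop with a capped dict-append is replaced by a symbol-outer scan over titles uppercased once, taking the first two matching titles per symbol with an early break.
-- outside the precondition, e.g. on match_headlines_to_symbols([('u', 'XA')], ['A', 'A']): A returns {'A': ['XA', 'XA']}, B returns {'A': ['XA']}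
import Mathlib
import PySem

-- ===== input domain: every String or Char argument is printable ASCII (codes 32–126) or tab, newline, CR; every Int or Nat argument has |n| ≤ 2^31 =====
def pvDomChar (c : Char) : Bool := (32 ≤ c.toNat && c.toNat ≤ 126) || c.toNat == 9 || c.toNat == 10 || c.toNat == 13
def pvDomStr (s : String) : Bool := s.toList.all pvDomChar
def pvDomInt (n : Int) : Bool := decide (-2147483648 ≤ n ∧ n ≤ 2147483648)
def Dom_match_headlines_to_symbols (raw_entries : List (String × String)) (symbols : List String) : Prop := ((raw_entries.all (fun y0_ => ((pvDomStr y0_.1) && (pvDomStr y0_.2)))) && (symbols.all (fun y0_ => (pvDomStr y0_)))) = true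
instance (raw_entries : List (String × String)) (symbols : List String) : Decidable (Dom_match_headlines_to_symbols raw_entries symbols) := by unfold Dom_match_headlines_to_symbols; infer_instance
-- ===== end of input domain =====

-- B replaces A's entry-outer double loop (capped dict-append, title.upper() per pair)
-- by a symbol-outer scan over titles uppercased once, taking the first two matches per symbol.


-- ===== PORT A =====
def match_headlines_to_symbols (raw_entries : List (String × String)) (symbols : List String) : List (String × List String) :=
  let result : PySem.Dict String (List String) :=
    symbols.foldl (fun d s => d.insert s ([] : List String)) PySem.Dict.empty
  let result := raw_entries.foldl (fun d e =>
    symbols.foldl (fun d sym =>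
      if PySem.Str.isIn (PySem.Str.upper sym) (PySem.Str.upper e.2)
          && decide ((d.getD sym []).length < 2)
      then d.modify sym [] (fun l => l ++ [e.2]) else d) d) result
  result.items

-- ===== PORT B =====
-- scan the (title, uppercased title) pairs, collecting matching titles, breaking at two
def pvScan (su : String) (acc : List String) : List (String × String) → List String
  | [] => acc
  | p :: rest =>
    if PySem.Str.isIn su p.2 then
      if (acc ++ [p.1]).length = 2 then acc ++ [p.1]
      else pvScan su (acc ++ [p.1]) rest
    else pvScan su acc rest

def match_headlines_to_symbols_alt (raw_entries : List (String × String)) (symbols : List String) : List (String × List String) :=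
  let pairs := raw_entries.map (fun e => (e.2, PySem.Str.upper e.2))
  (symbols.foldl (fun d s => d.insert s (pvScan (PySem.Str.upper s) [] pairs))
      (PySem.Dict.empty : PySem.Dict String (List String))).items

-- ===== PRECONDITION & SPEC =====
-- Pre_ excludes symbol lists with duplicates: on those A's inner loop visits the duplicated
-- key several times per entry and can append the same title twice, while B's per-symbol scan
-- records it once — a defensible-corner artefact of duplicate dict keys.
def Pre_match_headlines_to_symbols (raw_entries : List (String × String)) (symbols : List String) : Prop :=
  symbols.Nodup
instance (raw_entries : List (String × String)) (symbols : List String) : Decidable (Pre_match_headlines_to_symbols raw_entries symbols) := by unfold Pre_match_headlines_to_symbols; infer_instance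

def pvWitness_match_headlines_to_symbols : (List (String × String)) × List String :=
  ([("u1", "Apple beats AMZN"), ("u2", "apple again")], ["AAPL", "APPLE", "AMZN"])

def Spec_match_headlines_to_symbols (raw_entries : List (String × String)) (symbols : List String) (out : List (String × List String)) : Prop := out = match_headlines_to_symbols_alt raw_entries symbols
instance (raw_entries : List (String × String)) (symbols : List String) (out : List (String × List String)) : Decidable (Spec_match_headlines_to_symbols raw_entries symbols out) := by unfold Spec_match_headlines_to_symbols; infer_instance

-- ===== CLAIM (what is proved, stated in full; the proofs are below) =====
def Claim_equal_match_headlines_to_symbols : Prop := ∀ (raw_entries : List (String × String)) (symbols : List String), Dom_match_headlines_to_symbols raw_entries symbols → Pre_match_headlines_to_symbols raw_entries symbols → Spec_match_headlines_to_symbols raw_entries symbols (match_headlines_to_symbols raw_entries symbols)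

-- ===== LEMMAS AND PROOFS =====

-- A's inner fold leaves the value at a key not in the visited list unchanged
theorem pvInner_getD_not_mem (t : String) (s : String) :
    ∀ (syms : List String) (d : PySem.Dict String (List String)), s ∉ syms →
    (syms.foldl (fun d sym =>
      if PySem.Str.isIn (PySem.Str.upper sym) (PySem.Str.upper t)
          && decide ((d.getD sym []).length < 2)
      then d.modify sym [] (fun l => l ++ [t]) else d) d).getD s []
    = d.getD s [] := by
  intro syms
  induction syms with
  | nil => intro d _; rfl
  | cons sym rest ih =>
    intro d hs
    have hne : s ≠ sym := fun h => hs (h ▸ List.mem_cons_self)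
    have hrest : s ∉ rest := fun h => hs (List.mem_cons_of_mem _ h)
    simp only [List.foldl_cons]
    rw [ih _ hrest]
    split
    · exact PySem.Dict.getD_modify_of_ne d [] _ hne
    · rfl

-- A's inner fold over a Nodup symbol list applies the capped append exactly once at s
theorem pvInner_getD_mem (t : String) (s : String) :
    ∀ (syms : List String) (d : PySem.Dict String (List String)), syms.Nodup → s ∈ syms →
    (syms.foldl (fun d sym =>
      if PySem.Str.isIn (PySem.Str.upper sym) (PySem.Str.upper t)
          && decide ((d.getD sym []).length < 2)
      then d.modify sym [] (fun l => l ++ [t]) else d) d).getD s []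
    = (if PySem.Str.isIn (PySem.Str.upper s) (PySem.Str.upper t)
          && decide ((d.getD s []).length < 2)
       then d.getD s [] ++ [t] else d.getD s []) := by
  intro syms
  induction syms with
  | nil => intro d _ hs; cases hs
  | cons sym rest ih =>
    intro d hnd hs
    have hndr : rest.Nodup := (List.nodup_cons.mp hnd).2
    by_cases heq : s = sym
    · subst heq
      have hrest : s ∉ rest := (List.nodup_cons.mp hnd).1
      simp only [List.foldl_cons]
      split
      · rw [pvInner_getD_not_mem t s rest _ hrest,
            PySem.Dict.getD_modify_self]
      · rw [pvInner_getD_not_mem t s rest _ hrest]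
    · have hs' : s ∈ rest := by
        cases hs with
        | head => exact absurd rfl heq
        | tail _ h => exact h
      simp only [List.foldl_cons]
      have hpres : ∀ d' : PySem.Dict String (List String),
          ((if PySem.Str.isIn (PySem.Str.upper sym) (PySem.Str.upper t)
              && decide ((d'.getD sym []).length < 2)
            then d'.modify sym [] (fun l => l ++ [t]) else d')).getD s []
          = d'.getD s [] := by
        intro d'
        split
        · exact PySem.Dict.getD_modify_of_ne d' [] _ heq
        · rfl
      rw [ih _ hndr hs', hpres d]

-- A's inner fold keeps the key list when every visited symbol is already a key
theorem pvInner_keys (t : String) :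
    ∀ (syms : List String) (d : PySem.Dict String (List String)),
    (∀ sym ∈ syms, sym ∈ d.keys) →
    (syms.foldl (fun d sym =>
      if PySem.Str.isIn (PySem.Str.upper sym) (PySem.Str.upper t)
          && decide ((d.getD sym []).length < 2)
      then d.modify sym [] (fun l => l ++ [t]) else d) d).keys
    = d.keys := by
  intro syms
  induction syms with
  | nil => intro d _; rfl
  | cons sym rest ih =>
    intro d hmem
    simp only [List.foldl_cons]
    have hk : ((if PySem.Str.isIn (PySem.Str.upper sym) (PySem.Str.upper t)
          && decide ((d.getD sym []).length < 2)
        then d.modify sym [] (fun l => l ++ [t]) else d)).keys = d.keys := by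
      split
      · rw [PySem.Dict.keys_modify]
        exact PySem.Dict.keys_insert_of_contains d _
          ((PySem.Dict.contains_iff_mem_keys d sym).mpr (hmem sym List.mem_cons_self))
      · rfl
    rw [ih _ (fun x hx => by rw [hk]; exact hmem x (List.mem_cons_of_mem _ hx)), hk]

-- the initial dict {s: [] for s in symbols}: lookup
theorem pvInit_getD (s : String) :
    ∀ (syms : List String) (d : PySem.Dict String (List String)),
    (syms.foldl (fun d s' => d.insert s' ([] : List String)) d).getD s []
    = if s ∈ syms then [] else d.getD s [] := by
  intro syms
  induction syms with
  | nil => intro d; simp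
  | cons s' rest ih =>
    intro d
    simp only [List.foldl_cons]
    rw [ih]
    by_cases hs : s ∈ rest
    · simp [hs]
    · rw [if_neg hs, PySem.Dict.getD_insert]
      by_cases h : s = s' <;> simp [h, hs]

-- A's entry fold, read at a fixed symbol s, is the capped-append fold over the titles
theorem pvOuter_getD (symbols : List String) (hnd : symbols.Nodup) (s : String) (hs : s ∈ symbols) :
    ∀ (entries : List (String × String)) (d : PySem.Dict String (List String)),
    (entries.foldl (fun d e =>
      symbols.foldl (fun d sym =>
        if PySem.Str.isIn (PySem.Str.upper sym) (PySem.Str.upper e.2)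
            && decide ((d.getD sym []).length < 2)
        then d.modify sym [] (fun l => l ++ [e.2]) else d) d) d).getD s []
    = entries.foldl (fun v e =>
        if PySem.Str.isIn (PySem.Str.upper s) (PySem.Str.upper e.2)
            && decide (v.length < 2)
        then v ++ [e.2] else v) (d.getD s []) := by
  intro entries
  induction entries with
  | nil => intro d; rfl
  | cons e rest ih =>
    intro d
    simp only [List.foldl_cons]
    rw [ih, pvInner_getD_mem e.2 s symbols d hnd hs]

-- A's entry fold keeps the key list
theorem pvOuter_keys (symbols : List String) :
    ∀ (entries : List (String × String)) (d : PySem.Dict String (List String)),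
    d.keys = symbols →
    (entries.foldl (fun d e =>
      symbols.foldl (fun d sym =>
        if PySem.Str.isIn (PySem.Str.upper sym) (PySem.Str.upper e.2)
            && decide ((d.getD sym []).length < 2)
        then d.modify sym [] (fun l => l ++ [e.2]) else d) d) d).keys = symbols := by
  intro entries
  induction entries with
  | nil => intro d h; exact h
  | cons e rest ih =>
    intro d h
    simp only [List.foldl_cons]
    exact ih _ (by rw [pvInner_keys e.2 symbols d (fun sym hsym => h ▸ hsym)]; exact h)

-- once two titles are collected, the capped-append fold is the identity
theorem pvCap_stop (su : String) :
    ∀ (entries : List (String × String)) (v : List String), 2 ≤ v.length →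
    entries.foldl (fun v e =>
      if PySem.Str.isIn su (PySem.Str.upper e.2) && decide (v.length < 2)
      then v ++ [e.2] else v) v = v := by
  intro entries
  induction entries with
  | nil => intro v _; rfl
  | cons e rest ih =>
    intro v hv
    simp only [List.foldl_cons]
    have hd : decide (v.length < 2) = false := decide_eq_false (by omega)
    rw [hd, Bool.and_false, if_neg (by simp)]
    exact ih v hv

-- the capped-append fold over titles equals B's early-break scan over the uppercased pairs
theorem pvCap_eq_scan (su : String) :
    ∀ (entries : List (String × String)) (acc : List String), acc.length < 2 →
    entries.foldl (fun v e =>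
      if PySem.Str.isIn su (PySem.Str.upper e.2) && decide (v.length < 2)
      then v ++ [e.2] else v) acc
    = pvScan su acc (entries.map (fun e => (e.2, PySem.Str.upper e.2))) := by
  intro entries
  induction entries with
  | nil => intro acc _; rfl
  | cons e rest ih =>
    intro acc hacc
    simp only [List.foldl_cons, List.map_cons, pvScan]
    by_cases hin : PySem.Str.isIn su (PySem.Str.upper e.2) = true
    · have hd : decide (acc.length < 2) = true := decide_eq_true hacc
      rw [hin, hd, Bool.true_and, if_pos rfl]
      by_cases hlen : (acc ++ [e.2]).length = 2
      · rw [if_pos hlen]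
        exact pvCap_stop su rest _ (le_of_eq hlen.symm)
      · rw [if_neg hlen]
        have hl : (acc ++ [e.2]).length = acc.length + 1 := by simp
        exact ih _ (by omega)
    · rw [Bool.not_eq_true] at hin
      rw [hin, Bool.false_and, if_neg (by simp)]
      exact ih acc hacc

-- ===== VERDICT (by name: the statement is the Claim_ definition above) =====
theorem match_headlines_to_symbols_spec : Claim_equal_match_headlines_to_symbols := by
  intro raw_entries symbols _ hnd
  unfold Spec_match_headlines_to_symbols match_headlines_to_symbols match_headlines_to_symbols_alt
  -- B's items: a fold of fresh distinct inserts from the empty dict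
  have hB := PySem.Dict.items_foldl_insert_fresh (ν := List String) symbols id
      (fun s => pvScan (PySem.Str.upper s) [] (raw_entries.map (fun e => (e.2, PySem.Str.upper e.2))))
      PySem.Dict.empty (fun _ _ => rfl) (by simpa using hnd)
  simp only [id_eq] at hB
  rw [hB, show (PySem.Dict.empty : PySem.Dict String (List String)).items = [] from rfl,
      List.nil_append]
  -- A's initial dict {s: [] for s in symbols}
  have hA0 := PySem.Dict.items_foldl_insert_fresh (ν := List String) symbols id
      (fun _ => ([] : List String)) PySem.Dict.empty (fun _ _ => rfl) (by simpa using hnd)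
  simp only [id_eq] at hA0
  have hk0 : (symbols.foldl (fun d s => d.insert s ([] : List String)) PySem.Dict.empty).keys
      = symbols := by
    simp only [PySem.Dict.keys]
    rw [hA0]
    simp [show (PySem.Dict.empty : PySem.Dict String (List String)).items = [] from rfl,
      Function.comp_def]
  -- A's final dict: keys unchanged, hence its items are keys paired with their values
  have hkF := pvOuter_keys symbols raw_entries _ hk0
  have hndF : (raw_entries.foldl (fun d e =>
      symbols.foldl (fun d sym =>
        if PySem.Str.isIn (PySem.Str.upper sym) (PySem.Str.upper e.2)
            && decide ((d.getD sym []).length < 2)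
        then d.modify sym [] (fun l => l ++ [e.2]) else d) d)
      (symbols.foldl (fun d s => d.insert s ([] : List String)) PySem.Dict.empty)).keys.Nodup := by
    rw [hkF]; exact hnd
  rw [PySem.Dict.items_eq_map_keys _ hndF [], hkF]
  apply List.map_congr_left
  intro s hs
  rw [pvOuter_getD symbols hnd s hs raw_entries _, pvInit_getD s symbols PySem.Dict.empty,
      if_pos hs]
  exact congrArg (Prod.mk s) (pvCap_eq_scan (PySem.Str.upper s) raw_entries [] (by simp))
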